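-- pv_equiv track=rewrite | github.com/OrangePeelZ/codingTime | Serialize_and_deserialize_binary_tree.py | purge
-- ===== SOURCE A (Python) =====
-- def purge(l):
--     pointer = len(l) - 1
--     while pointer >= 0:
--         if l[pointer] == '#':
--             pointer -= 1
--         else:
--             break
--     return l[:(pointer + 1)]
-- ===== SOURCE B (Python) =====
-- def purge(l):
--     last = -1
--     for i, x in enumerate(l):
--         if x != '#':
--             last = i
--     return l[:last + 1]
-- ===== Notes on version B (the rewrite author's own statement) =====
-- stated objective: alternative
-- what changed: Replaces the backward while-loop with early break by a forward single pass that maintains the last non-'#' index as an accumulator and slices once at the end.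
import Mathlib
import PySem

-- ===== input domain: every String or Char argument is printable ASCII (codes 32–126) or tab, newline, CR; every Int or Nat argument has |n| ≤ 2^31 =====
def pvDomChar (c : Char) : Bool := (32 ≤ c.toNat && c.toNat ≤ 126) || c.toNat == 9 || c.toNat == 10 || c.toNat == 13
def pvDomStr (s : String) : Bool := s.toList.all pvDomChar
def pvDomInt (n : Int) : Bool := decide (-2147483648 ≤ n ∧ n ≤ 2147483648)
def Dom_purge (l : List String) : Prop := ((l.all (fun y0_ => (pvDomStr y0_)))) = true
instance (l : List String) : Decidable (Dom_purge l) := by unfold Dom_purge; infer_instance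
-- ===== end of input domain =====

-- B replaces A's backward while-loop (early break) by a forward single pass that
-- maintains the last non-'#' index and slices once at the end (alternative decomposition).


-- ===== PORT A =====
-- the while loop: pointer decreases while l[pointer] == '#'
def purgeLoopA (l : List String) (p : Int) : Int :=
  if _h : p ≥ 0 then
    if PySem.List.pyGet? l p = some "#" then purgeLoopA l (p - 1) else p
  else p
termination_by (p + 1).toNat
decreasing_by omega

def purge (l : List String) : List String :=
  let pointer := purgeLoopA l ((l.length : Int) - 1)
  PySem.List.slice l none (some (pointer + 1))

-- ===== PORT B =====
def purge_alt (l : List String) : List String :=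
  let last := (PySem.List.enumerate l).foldl
    (fun last (ix : Int × String) => if ix.2 ≠ "#" then ix.1 else last) (-1)
  PySem.List.slice l none (some (last + 1))

-- ===== PRECONDITION & SPEC =====
def Spec_purge (l : List String) (out : List String) : Prop := out = purge_alt l
instance (l : List String) (out : List String) : Decidable (Spec_purge l out) := by unfold Spec_purge; infer_instance

-- ===== CLAIM (what is proved, stated in full; the proofs are below) =====
def Claim_equal_purge : Prop := ∀ (l : List String), Dom_purge l → Spec_purge l (purge l)

-- ===== LEMMAS AND PROOFS =====

-- length of l after trimming trailing "#"
def trimLen (l : List String) : Nat := (l.reverse.dropWhile (· == "#")).length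

theorem trimLen_append (l : List String) (x : String) :
    trimLen (l ++ [x]) = if x = "#" then trimLen l else l.length + 1 := by
  by_cases hx : x = "#" <;> simp [trimLen, hx]

theorem trimLen_take_succ (l : List String) (m : Nat) (hm : m < l.length) :
    trimLen (l.take (m + 1)) =
      if l[m] = "#" then trimLen (l.take m) else m + 1 := by
  have h1 : l.take (m + 1) = l.take m ++ [l[m]] := List.take_succ_eq_append_getElem hm
  rw [h1, trimLen_append]
  by_cases hx : l[m] = "#" <;> simp [hx, List.length_take, Nat.min_eq_left (Nat.le_of_lt hm)]

theorem purgeLoopA_eq (l : List String) (m : Nat) (hm : m ≤ l.length) :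
    purgeLoopA l ((m : Int) - 1) = (trimLen (l.take m) : Int) - 1 := by
  induction m with
  | zero => rw [purgeLoopA]; simp [trimLen]
  | succ m ih =>
      have hm' : m < l.length := hm
      rw [purgeLoopA]
      have hget : PySem.List.pyGet? l ((m : Int) + 1 - 1) = some l[m] := by
        simp [PySem.List.pyGet?, PySem.List.pyIdx?, hm']
      push_cast
      rw [show ((m : Int) + 1 - 1) = (m : Int) by ring] at hget ⊢
      rw [trimLen_take_succ l m hm']
      by_cases hx : l[m] = "#"
      · have := ih (Nat.le_of_lt hm')
        simp [hget, hx, this]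
      · simp [hget, hx]

theorem foldl_last_eq (l : List String) :
    (PySem.List.enumerate l).foldl
      (fun last (ix : Int × String) => if ix.2 ≠ "#" then ix.1 else last) (-1)
      = (trimLen l : Int) - 1 := by
  induction l using List.reverseRecOn with
  | nil => simp [PySem.List.enumerate, trimLen]
  | append_singleton l x ih =>
      rw [PySem.List.enumerate_append]
      rw [List.foldl_append, ih]
      rw [trimLen_append]
      by_cases hx : x = "#"
      · simp [PySem.List.enumerate, hx]
      · simp [PySem.List.enumerate, hx]

-- ===== VERDICT (by name: the statement is the Claim_ definition above) =====
theorem purge_spec : Claim_equal_purge := by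
  intro l _
  unfold Spec_purge purge purge_alt
  rw [purgeLoopA_eq l l.length le_rfl, foldl_last_eq]
  simp
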